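-- pv_equiv track=rewrite | github.com/sunjein/scrapbox-new-page-count | main.py | make_scrapbox_table
-- ===== SOURCE A (Python) =====
-- def make_scrapbox_table(monthly_data):
--     table_text = "table:page\n"
--     table_text += "\t{}\t{}\t{}\t{}\n".format("年/月", "合計", "増加", "コメント")
--     total = 0
--     for month in monthly_data:
--         total += month[1]
--         table_text += "\t{}\t{}\t{}\t\n".format(month[0], total, month[1])
--     return table_text
-- ===== SOURCE B (Python) =====
-- def make_scrapbox_table(monthly_data):
--     # Two-pass: compute all running totals first, then render rows and join.
--     totals = []
--     t = 0
--     for _, inc in monthly_data: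
--         t += inc
--         totals.append(t)
--     rows = ["\t{}\t{}\t{}\t\n".format(name, tot, inc)
--             for (name, inc), tot in zip(monthly_data, totals)]
--     return "table:page\n" + "\t年/月\t合計\t増加\tコメント\n" + "".join(rows)
-- ===== Notes on version B (the rewrite author's own statement) =====
-- stated objective: alternative
-- what changed: Replaced the single interleaved accumulate-and-concatenate loop by a two-pass structure: one pass precomputes the prefix-sum totals, a second pass renders each row from the zipped (month, total) pairs and joins them onto the fixed header.
import Mathlib
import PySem

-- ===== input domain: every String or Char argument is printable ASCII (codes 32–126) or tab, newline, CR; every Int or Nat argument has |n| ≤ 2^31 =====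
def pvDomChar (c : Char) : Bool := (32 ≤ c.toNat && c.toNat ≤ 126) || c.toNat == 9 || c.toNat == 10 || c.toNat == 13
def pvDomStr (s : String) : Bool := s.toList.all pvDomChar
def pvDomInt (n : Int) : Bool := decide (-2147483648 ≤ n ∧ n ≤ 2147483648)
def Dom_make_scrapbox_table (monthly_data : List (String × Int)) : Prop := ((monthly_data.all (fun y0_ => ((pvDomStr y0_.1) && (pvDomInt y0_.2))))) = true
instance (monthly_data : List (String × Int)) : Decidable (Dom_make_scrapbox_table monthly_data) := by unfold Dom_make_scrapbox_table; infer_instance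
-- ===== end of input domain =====

-- B changes the decomposition only: prefix-sum totals first, then render rows and join (alternative, not faster).

-- ===== PORT A =====
-- header = "table:page\n" + "\t{}\t{}\t{}\t{}\n".format("年/月","合計","増加","コメント")
def pvHeader : List Char :=
  "table:page\n".toList ++ "\t年/月\t合計\t増加\tコメント\n".toList

-- one iteration of A's loop: total += month[1]; table_text += "\t{}\t{}\t{}\t\n".format(...)
def pvStepA (st : Int × List Char) (m : String × Int) : Int × List Char :=
  let total := st.1 + m.2
  (total, st.2 ++ '\t' :: m.1.toList ++ '\t' :: PySem.Int.toChars total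
             ++ '\t' :: PySem.Int.toChars m.2 ++ ['\t', '\n'])

def make_scrapbox_table (monthly_data : List (String × Int)) : String :=
  String.ofList (monthly_data.foldl pvStepA (0, pvHeader)).2

-- ===== PORT B =====
-- "\t{}\t{}\t{}\t\n".format(name, tot, inc)
def pvRow (name : String) (tot inc : Int) : List Char :=
  '\t' :: name.toList ++ '\t' :: PySem.Int.toChars tot
    ++ '\t' :: PySem.Int.toChars inc ++ ['\t', '\n']

-- first pass of B: t += inc; totals.append(t)
def pvStepScan (st : List Int × Int) (m : String × Int) : List Int × Int :=
  let t := st.2 + m.2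
  (st.1 ++ [t], t)

def pvTotals (monthly_data : List (String × Int)) : List Int :=
  (monthly_data.foldl pvStepScan ([], 0)).1

-- second pass of B: render each zipped (month, total) pair and join onto the header
def make_scrapbox_table_alt (monthly_data : List (String × Int)) : String :=
  let rows := ((monthly_data.zip (pvTotals monthly_data)).map
    (fun p => pvRow p.1.1 p.2 p.1.2))
  String.ofList (pvHeader ++ PySem.Chars.join [] rows)

-- ===== PRECONDITION & SPEC =====
def Spec_make_scrapbox_table (monthly_data : List (String × Int)) (out : String) : Prop := out = make_scrapbox_table_alt monthly_data
instance (monthly_data : List (String × Int)) (out : String) : Decidable (Spec_make_scrapbox_table monthly_data out) := by unfold Spec_make_scrapbox_table; infer_instance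

-- ===== CLAIM (what is proved, stated in full; the proofs are below) =====
def Claim_equal_make_scrapbox_table : Prop := ∀ (monthly_data : List (String × Int)), Dom_make_scrapbox_table monthly_data → Spec_make_scrapbox_table monthly_data (make_scrapbox_table monthly_data)

-- ===== LEMMAS AND PROOFS =====

-- the scan of B with an arbitrary accumulator prepends it
theorem pvScan_acc (md : List (String × Int)) (l : List Int) (t : Int) :
    (md.foldl pvStepScan (l, t)).1 = l ++ (md.foldl pvStepScan ([], t)).1 := by
  induction md generalizing l t with
  | nil => simp
  | cons m md ih =>
    simp only [List.foldl_cons, pvStepScan]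
    rw [ih (l ++ [t + m.2]), ih ([] ++ [t + m.2])]
    simp

-- Chars.join (= intercalate) with the empty separator is flatten
theorem pvJoin_nil_flatten (rows : List (List Char)) :
    PySem.Chars.join [] rows = rows.flatten := by
  induction rows with
  | nil => simp [PySem.Chars.join, List.intercalate]
  | cons r rs ih =>
    cases rs with
    | nil => simp [PySem.Chars.join, List.intercalate]
    | cons r' rs' =>
      simp only [PySem.Chars.join, List.intercalate, List.intersperse] at *
      simp [ih]

-- generalized totals (starting from t)
def pvTotalsFrom (md : List (String × Int)) (t : Int) : List Int :=
  (md.foldl pvStepScan ([], t)).1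

theorem pvTotalsFrom_cons (m : String × Int) (md : List (String × Int)) (t : Int) :
    pvTotalsFrom (m :: md) t = (t + m.2) :: pvTotalsFrom md (t + m.2) := by
  simp only [pvTotalsFrom, List.foldl_cons, pvStepScan]
  rw [pvScan_acc]
  simp

-- main invariant: A's loop from (t, acc) produces acc ++ the flattened rows of B with totals from t
theorem pvMain (md : List (String × Int)) (t : Int) (acc : List Char) :
    (md.foldl pvStepA (t, acc)).2
      = acc ++ ((md.zip (pvTotalsFrom md t)).map (fun p => pvRow p.1.1 p.2 p.1.2)).flatten := by
  induction md generalizing t acc with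
  | nil => simp [pvTotalsFrom]
  | cons m md ih =>
    simp only [List.foldl_cons, pvStepA]
    rw [ih, pvTotalsFrom_cons]
    simp [pvRow, List.zip_cons_cons]

-- ===== VERDICT (by name: the statement is the Claim_ definition above) =====
theorem make_scrapbox_table_spec : Claim_equal_make_scrapbox_table := by
  intro md _
  show make_scrapbox_table md = make_scrapbox_table_alt md
  simp only [make_scrapbox_table, make_scrapbox_table_alt, pvTotals]
  rw [pvJoin_nil_flatten, pvMain md 0 pvHeader]
  rfl
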